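-- pv_equiv track=rewrite | github.com/PeteMango/Contest | Online Assessment/TikTok S25/common_interest.py | maxSharedCategories
-- ===== SOURCE A (Python) =====
-- def maxSharedCategories(favoriteCategories):
--     favoriteCategories.sort(reverse=True)
--     div = [0] * 10005
--
--     for i in range(len(div) - 1, 0, -1):
--         for j in range(len(favoriteCategories)):
--             if i > favoriteCategories[j]:
--                 break
--
--             if favoriteCategories[j] % i == 0:
--                 div[i] += 1
--
--         if div[i] >= 2:
--             return i
--
--     return 1
-- ===== SOURCE B (Python) =====
-- def maxSharedCategories(favoriteCategories):
--     # Enumerate divisors <= 10004 of each positive element by trial division up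
--     # to sqrt(x), count them, and take the largest divisor shared by >= 2 elements.
--     # (A sorts its argument in place; B does not mutate it - return values agree.)
--     divs = []
--     for x in favoriteCategories:
--         if x > 0:
--             e = 1
--             while e * e <= x and e <= 10004:
--                 if x % e == 0:
--                     divs.append(e)
--                     f = x // e
--                     if f <= 10004 and f != e:
--                         divs.append(f)
--                 e += 1
--     cnt = {}
--     for d in divs:
--         cnt[d] = cnt.get(d, 0) + 1
--     best = 1
--     for d, c in cnt.items():
--         if c >= 2 and d > best:
--             best = d
--     return best
-- ===== Notes on version B (the rewrite author's own statement) =====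
-- stated objective: alternative
-- what changed: B enumerates each positive element's divisors <= 10004 by trial division up to sqrt(x) into a counting dict and returns the largest divisor counted at least twice, instead of A's downward scan of every candidate i = 10004..1 against the reverse-sorted array; B also does not mutate its argument (A sorts it in place).
import Mathlib
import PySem

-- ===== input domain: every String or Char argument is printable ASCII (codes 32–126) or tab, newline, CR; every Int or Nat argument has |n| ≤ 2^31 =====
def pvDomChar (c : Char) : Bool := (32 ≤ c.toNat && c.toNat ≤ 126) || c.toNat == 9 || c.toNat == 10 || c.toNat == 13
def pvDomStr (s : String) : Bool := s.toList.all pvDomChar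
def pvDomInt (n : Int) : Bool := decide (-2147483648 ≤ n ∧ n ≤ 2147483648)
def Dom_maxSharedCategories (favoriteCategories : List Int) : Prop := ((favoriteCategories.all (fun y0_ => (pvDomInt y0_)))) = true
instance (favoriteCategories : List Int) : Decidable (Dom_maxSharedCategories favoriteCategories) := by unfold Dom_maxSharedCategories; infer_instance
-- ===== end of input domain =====

-- B replaces A's downward scan of all candidates 10004..1 over the sorted array by per-element
-- divisor enumeration up to sqrt(x) and a counting dict (alternative algorithm, similar cost).
-- A sorts its argument in place; B does not mutate it — the equivalence is about the return value.

-- ===== PORT A =====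
-- inner 'for j in range(len(favoriteCategories))' loop with its break; div[i] via
-- List.getD/List.set at index i.toNat: i ∈ [1,10004] and len(div) = 10005, so the
-- Python indexing is always in range (no IndexError possible).
def innerA (i : Int) (ys : List Int) (d : List Int) : List Int :=
  match ys with
  | [] => d
  | y :: t =>
    if i > y then d
    else innerA i t (if PySem.Int.mod y i = 0 then d.set i.toNat (d.getD i.toNat 0 + 1) else d)

-- outer 'for i in range(len(div) - 1, 0, -1)' loop with its early return, i = k counting down
def outerA (ys : List Int) (d : List Int) : Nat → Int
  | 0 => 1
  | Nat.succ k =>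
    let i : Int := ((k + 1 : Nat) : Int)
    let d' := innerA i ys d
    if 2 ≤ d'.getD (k + 1) 0 then i else outerA ys d' k

def maxSharedCategories (favoriteCategories : List Int) : Int :=
  let ys := PySem.List.sorted favoriteCategories (fun x => x) true
  outerA ys (List.replicate 10005 0) 10004

-- ===== PORT B =====
-- 'while e * e <= x and e <= 10004' loop of Source B; fuel = x.toNat suffices since the loop
-- stops no later than e = x (e*e ≤ x forces e ≤ x), and exhaustion coincides with a false guard.
def divAuxC (x : Int) (e : Int) : Nat → List Int
  | 0 => []
  | Nat.succ fuel =>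
    if e * e ≤ x ∧ e ≤ 10004 then
      (if PySem.Int.mod x e = 0 then
         e :: (if PySem.Int.floordiv x e ≤ 10004 ∧ PySem.Int.floordiv x e ≠ e then
                 [PySem.Int.floordiv x e] else [])
       else []) ++ divAuxC x (e + 1) fuel
    else []

def divsOfC (x : Int) : List Int := divAuxC x 1 x.toNat

def maxSharedCategories_alt (favoriteCategories : List Int) : Int :=
  let divs := favoriteCategories.foldl (fun acc x => if 0 < x then acc ++ divsOfC x else acc) []
  let cnt := divs.foldl (fun d k => d.insert k (d.getD k 0 + 1)) (PySem.Dict.empty : PySem.Dict Int Int)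
  cnt.items.foldl (fun best p => if 2 ≤ p.2 ∧ best < p.1 then p.1 else best) 1

-- ===== PRECONDITION & SPEC =====
def Spec_maxSharedCategories (favoriteCategories : List Int) (out : Int) : Prop := out = maxSharedCategories_alt favoriteCategories
instance (favoriteCategories : List Int) (out : Int) : Decidable (Spec_maxSharedCategories favoriteCategories out) := by unfold Spec_maxSharedCategories; infer_instance

-- ===== CLAIM (what is proved, stated in full; the proofs are below) =====
def Claim_equal_maxSharedCategories : Prop := ∀ (favoriteCategories : List Int), Dom_maxSharedCategories favoriteCategories → Spec_maxSharedCategories favoriteCategories (maxSharedCategories favoriteCategories)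

-- ===== LEMMAS AND PROOFS =====

-- number of elements of xs that are positive and divisible by i
def cntDvd (xs : List Int) (i : Int) : Nat := xs.countP (fun y => decide (0 < y ∧ i ∣ y))

-- reference value: largest i ∈ [1, k] with cntDvd xs i ≥ 2, else 1
def goA (xs : List Int) : Nat → Int
  | 0 => 1
  | Nat.succ k => if 2 ≤ cntDvd xs ((k + 1 : Nat) : Int) then ((k + 1 : Nat) : Int) else goA xs k

theorem cntDvd_cons (x : Int) (xs : List Int) (i : Int) :
    cntDvd (x :: xs) i = (if 0 < x ∧ i ∣ x then 1 else 0) + cntDvd xs i := by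
  simp [cntDvd, List.countP_cons]
  by_cases h : 0 < x ∧ i ∣ x
  · simp [h]; omega
  · simp [h]

-- ---- A side ----

theorem innerA_length (i : Int) (ys d : List Int) : (innerA i ys d).length = d.length := by
  induction ys generalizing d with
  | nil => rfl
  | cons y t ih =>
    unfold innerA
    split
    · rfl
    · rw [ih]; split
      · simp
      · rfl

theorem innerA_getD_ne (i : Int) (ys d : List Int) (j : Nat) (hj : j ≠ i.toNat) :
    (innerA i ys d).getD j 0 = d.getD j 0 := by
  induction ys generalizing d with
  | nil => rfl
  | cons y t ih =>
    unfold innerA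
    split
    · rfl
    · rw [ih]
      split
      · rename_i h
        simp [List.getD, List.getElem?_set_ne (Ne.symm hj)]
      · rfl

theorem innerA_getD (i : Int) (ys d : List Int) (hi : 1 ≤ i) (hlen : i.toNat < d.length)
    (hs : ys.Pairwise (fun a b => b ≤ a)) :
    (innerA i ys d).getD i.toNat 0 = d.getD i.toNat 0 + (cntDvd ys i : Int) := by
  induction ys generalizing d with
  | nil => simp [innerA, cntDvd]
  | cons y t ih =>
    have hyt : ∀ z ∈ t, z ≤ y := fun z hz => (List.pairwise_cons.mp hs).1 z hz
    unfold innerA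
    split
    · rename_i hgt
      have h0 : cntDvd (y :: t) i = 0 := by
        apply List.countP_eq_zero.mpr
        intro z hz
        simp only [decide_eq_true_eq, not_and]
        intro hz0 hdvd
        have hle := Int.le_of_dvd hz0 hdvd
        rcases List.mem_cons.mp hz with rfl | hzt
        · omega
        · have := hyt z hzt; omega
      rw [h0]; simp
    · rename_i hngt
      have hyi : i ≤ y := by omega
      have hcnt : cntDvd (y :: t) i = (if i ∣ y then 1 else 0) + cntDvd t i := by
        rw [cntDvd_cons]
        have : (0 < y ∧ i ∣ y) ↔ i ∣ y := ⟨fun h => h.2, fun h => ⟨by omega, h⟩⟩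
        rw [if_congr this rfl rfl]
      have hs' : t.Pairwise (fun a b => b ≤ a) := (List.pairwise_cons.mp hs).2
      split
      · rename_i hmod
        have hlen' : i.toNat < (d.set i.toNat (d.getD i.toNat 0 + 1)).length := by simpa using hlen
        rw [ih _ hlen' hs']
        have : (d.set i.toNat (d.getD i.toNat 0 + 1)).getD i.toNat 0 = d.getD i.toNat 0 + 1 := by
          rw [List.getD_eq_getElem?_getD, List.getElem?_set_self hlen]; rfl
        rw [this, hcnt]
        have hdvd : i ∣ y := (PySem.Int.mod_eq_zero_iff_dvd y i).mp hmod
        rw [if_pos hdvd]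
        push_cast; ring
      · rename_i hmod
        rw [ih _ hlen hs', hcnt]
        have hdvd : ¬ i ∣ y := fun h => hmod ((PySem.Int.mod_eq_zero_iff_dvd y i).mpr h)
        rw [if_neg hdvd]
        push_cast; ring

theorem outerA_eq_goA (k : Nat) (ys d : List Int) (hk : k ≤ 10004) (hlen : d.length = 10005)
    (hz : ∀ j : Nat, 1 ≤ j → j ≤ k → d.getD j 0 = 0)
    (hs : ys.Pairwise (fun a b => b ≤ a)) :
    outerA ys d k = goA ys k := by
  induction k generalizing d with
  | zero => rfl
  | succ k ih =>
    unfold outerA goA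
    have hi1 : (1:Int) ≤ ((k + 1 : Nat) : Int) := by push_cast; omega
    have hitn : ((k + 1 : Nat) : Int).toNat = k + 1 := by omega
    have hlen' : ((k + 1 : Nat) : Int).toNat < d.length := by omega
    have hkey : (innerA ((k + 1 : Nat) : Int) ys d).getD (k + 1) 0
        = (cntDvd ys ((k + 1 : Nat) : Int) : Int) := by
      have := innerA_getD ((k + 1 : Nat) : Int) ys d hi1 hlen' hs
      rw [hitn] at this
      rw [this, hz (k + 1) (by omega) (by omega)]
      ring
    simp only [hkey]
    have hcond : ((2:Int) ≤ (cntDvd ys ((k + 1 : Nat) : Int) : Int)) ↔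
        2 ≤ cntDvd ys ((k + 1 : Nat) : Int) := by exact_mod_cast Iff.rfl
    split
    · rename_i h; rw [if_pos (hcond.mp h)]
    · rename_i h
      rw [if_neg (fun hc => h (hcond.mpr hc))]
      apply ih
      · omega
      · rw [innerA_length]; exact hlen
      · intro j hj1 hjk
        rw [innerA_getD_ne]
        · exact hz j hj1 (by omega)
        · omega

theorem goA_congr (xs ys : List Int) (h : ∀ i : Int, cntDvd xs i = cntDvd ys i) (k : Nat) :
    goA xs k = goA ys k := by
  induction k with
  | zero => rfl
  | succ k ih => unfold goA; rw [h, ih]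

theorem A_eq_goA (xs : List Int) : maxSharedCategories xs = goA xs 10004 := by
  unfold maxSharedCategories
  rw [outerA_eq_goA 10004 _ _ (by omega) (by exact List.length_replicate) _ (PySem.List.sorted_pairwise_rev xs _)]
  · exact goA_congr _ _ (fun i => (PySem.List.sorted_perm xs _ true).countP_eq _) 10004
  · intro j _ _
    rw [List.getD_eq_getElem?_getD, List.getElem?_replicate]
    split <;> rfl

-- ---- goA characterization ----

theorem goA_one_le (xs : List Int) (k : Nat) : 1 ≤ goA xs k := by
  induction k with
  | zero => simp [goA]
  | succ k ih => unfold goA; split <;> omega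

theorem goA_ge (xs : List Int) (k i : Nat) (h1 : 1 ≤ i) (hk : i ≤ k)
    (hc : 2 ≤ cntDvd xs (i : Int)) : (i : Int) ≤ goA xs k := by
  induction k with
  | zero => omega
  | succ k ih =>
    unfold goA
    split
    · push_cast; omega
    · rename_i h
      by_cases hik : i = k + 1
      · subst hik; exact absurd hc h
      · exact ih (by omega)

theorem goA_cases (xs : List Int) (k : Nat) :
    goA xs k = 1 ∨ ∃ i : Nat, 1 ≤ i ∧ i ≤ k ∧ 2 ≤ cntDvd xs (i : Int) ∧ goA xs k = (i : Int) := by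
  induction k with
  | zero => left; rfl
  | succ k ih =>
    unfold goA
    split
    · right; exact ⟨k + 1, by omega, by omega, by assumption, rfl⟩
    · rcases ih with h | ⟨i, h1, h2, h3, h4⟩
      · left; exact h
      · right; exact ⟨i, h1, by omega, h3, h4⟩

-- ---- B side ----

theorem ediv_ediv_self (x e : Int) (hx : 1 ≤ x) (he : 1 ≤ e) (hdvd : e ∣ x) :
    x / (x / e) = e := by
  obtain ⟨p, hp⟩ := hdvd
  have hpe : x / e = p := by rw [hp]; exact Int.mul_ediv_cancel_left p (by omega)
  have hp0 : 0 < p := by nlinarith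
  rw [hpe, hp, mul_comm]
  exact Int.mul_ediv_cancel_left e (by omega)

theorem pair_excl (x e d : Int) (hx : 1 ≤ x) (he : 1 ≤ e) :
    ¬((e ∣ x ∧ d = e) ∧ (e ∣ x ∧ d = x / e ∧ x / e ≤ 10004 ∧ x / e ≠ e)) ∧
    ¬((e ∣ x ∧ d = e) ∧ (d ∣ x ∧ d ≤ 10004 ∧ e + 1 ≤ d ∧ e + 1 ≤ x / d)) ∧
    ¬((e ∣ x ∧ d = x / e ∧ x / e ≤ 10004 ∧ x / e ≠ e) ∧ (d ∣ x ∧ d ≤ 10004 ∧ e + 1 ≤ d ∧ e + 1 ≤ x / d)) := by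
  refine ⟨?_, ?_, ?_⟩
  · rintro ⟨⟨_, rfl⟩, ⟨_, h2, _, hne⟩⟩
    exact hne h2.symm
  · rintro ⟨⟨_, rfl⟩, ⟨_, _, h3, _⟩⟩
    omega
  · rintro ⟨⟨hedvd, rfl, _, _⟩, ⟨_, _, _, h4⟩⟩
    rw [ediv_ediv_self x e hx he hedvd] at h4
    omega

theorem pair_split (x e d : Int) (hx : 1 ≤ x) (he : 1 ≤ e) (hd : 1 ≤ d)
    (hee : e * e ≤ x) (hcap : e ≤ 10004) :
    ((d ∣ x ∧ d ≤ 10004 ∧ e ≤ d ∧ e ≤ x / d) ↔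
      ((e ∣ x ∧ d = e) ∨ (e ∣ x ∧ d = x / e ∧ x / e ≤ 10004 ∧ x / e ≠ e) ∨
        (d ∣ x ∧ d ≤ 10004 ∧ e + 1 ≤ d ∧ e + 1 ≤ x / d))) := by
  have he0 : 0 < e := by omega
  have hd0 : 0 < d := by omega
  constructor
  · rintro ⟨hdvd, hd4, hed, hexd⟩
    by_cases h3 : e + 1 ≤ d ∧ e + 1 ≤ x / d
    · exact Or.inr (Or.inr ⟨hdvd, hd4, h3.1, h3.2⟩)
    · obtain ⟨q, hq⟩ := hdvd
      have hxd : x / d = q := by rw [hq]; exact Int.mul_ediv_cancel_left q (by omega)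
      by_cases hde : d = e
      · exact Or.inl ⟨⟨q, by rw [← hde]; exact hq⟩, hde⟩
      · have hqe : q = e := by rw [hxd] at hexd h3; omega
        have hedvd : e ∣ x := ⟨d, by rw [hq, hqe]; ring⟩
        have hxe : x / e = d := by
          rw [hq, hqe, mul_comm]; exact Int.mul_ediv_cancel_left d (by omega)
        exact Or.inr (Or.inl ⟨hedvd, hxe.symm, by rw [hxe]; exact hd4, by rw [hxe]; exact hde⟩)
  · rintro (⟨hedvd, rfl⟩ | ⟨hedvd, rfl, h4, hne⟩ | ⟨h1, h2, h3, h4⟩)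
    · exact ⟨hedvd, by omega, le_refl _, by rw [Int.le_ediv_iff_mul_le he0]; exact hee⟩
    · refine ⟨Int.ediv_dvd_of_dvd hedvd, h4, ?_, ?_⟩
      · rw [Int.le_ediv_iff_mul_le he0]; exact hee
      · rw [ediv_ediv_self x e hx he hedvd]
    · exact ⟨h1, h2, by omega, by omega⟩

set_option maxHeartbeats 1000000 in
theorem count_divAuxC (x d : Int) (hx : 1 ≤ x) (hd : 1 ≤ d) :
    ∀ (fuel : Nat) (e : Int), 1 ≤ e → x < e + fuel →
      (divAuxC x e fuel).count d =
        if d ∣ x ∧ d ≤ 10004 ∧ e ≤ d ∧ e ≤ x / d then 1 else 0 := by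
  intro fuel
  induction fuel with
  | zero =>
    intro e he hf
    rw [divAuxC, List.count_nil, if_neg]
    rintro ⟨hdvd, -, hed, hexd⟩
    have := Int.ediv_le_self d (by omega : (0:Int) ≤ x)
    omega
  | succ fuel ih =>
    intro e he hf
    rw [divAuxC]
    by_cases hg : e * e ≤ x ∧ e ≤ 10004
    · rw [if_pos hg, List.count_append, ih (e + 1) (by omega) (by omega)]
      have hfd : PySem.Int.floordiv x e = x / e := PySem.Int.floordiv_eq_ediv_of_pos (by omega)
      have hhead : (if PySem.Int.mod x e = 0 then
            e :: (if PySem.Int.floordiv x e ≤ 10004 ∧ PySem.Int.floordiv x e ≠ e then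
                    [PySem.Int.floordiv x e] else [])
          else []).count d
          = (if e ∣ x ∧ d = e then 1 else 0)
            + (if e ∣ x ∧ d = x / e ∧ x / e ≤ 10004 ∧ x / e ≠ e then 1 else 0) := by
        rw [hfd]
        by_cases hedvd : e ∣ x
        · rw [if_pos ((PySem.Int.mod_eq_zero_iff_dvd x e).mpr hedvd)]
          by_cases hin : x / e ≤ 10004 ∧ x / e ≠ e
          · rw [if_pos hin]
            simp only [List.count_cons, List.count_nil, beq_iff_eq]
            by_cases h1 : d = e <;> by_cases h2 : d = x / e <;>
              simp [h1, h2, hedvd, hin, eq_comm] <;> omega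
          · rw [if_neg hin]
            simp only [List.count_cons, List.count_nil, beq_iff_eq]
            by_cases h1 : d = e <;> simp [h1, hedvd, eq_comm] <;> tauto
        · rw [if_neg (fun h => hedvd ((PySem.Int.mod_eq_zero_iff_dvd x e).mp h))]
          simp [hedvd]
      rw [hhead]
      have hiff := pair_split x e d hx he hd hg.1 hg.2
      obtain ⟨x1, x2, x3⟩ := pair_excl x e d hx he
      simp only [hiff]
      clear hiff
      split_ifs <;> omega
    · rw [if_neg hg, List.count_nil, if_neg]
      rintro ⟨hdvd, hd4, hed, hexd⟩
      apply hg
      constructor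
      · calc e * e ≤ d * (x / d) := by
              apply mul_le_mul hed hexd (by omega) (by omega)
            _ = x := by rw [mul_comm]; exact Int.ediv_mul_cancel hdvd
      · omega

theorem count_divsOfC (x d : Int) (hx : 0 < x) (hd : 1 ≤ d) :
    (divsOfC x).count d = if d ∣ x ∧ d ≤ 10004 then 1 else 0 := by
  unfold divsOfC
  rw [count_divAuxC x d (by omega) hd x.toNat 1 le_rfl (by omega)]
  have hiff : (d ∣ x ∧ d ≤ 10004 ∧ 1 ≤ d ∧ 1 ≤ x / d) ↔ (d ∣ x ∧ d ≤ 10004) := by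
    constructor
    · rintro ⟨a, b, -, -⟩; exact ⟨a, b⟩
    · rintro ⟨a, b⟩
      refine ⟨a, b, hd, ?_⟩
      rw [Int.le_ediv_iff_mul_le (by omega)]
      have := Int.le_of_dvd (by omega) a
      omega
  simp only [hiff]

theorem mem_divAuxC (x k : Int) (hx : 1 ≤ x) :
    ∀ (fuel : Nat) (e : Int), 1 ≤ e → k ∈ divAuxC x e fuel → 1 ≤ k := by
  intro fuel
  induction fuel with
  | zero => intro e he h; simp [divAuxC] at h
  | succ fuel ih =>
    intro e he h
    rw [divAuxC] at h
    by_cases hg : e * e ≤ x ∧ e ≤ 10004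
    · rw [if_pos hg, List.mem_append] at h
      rcases h with h | h
      · have hxe : 1 ≤ x / e := by
          rw [Int.le_ediv_iff_mul_le (by omega)]
          nlinarith [hg.1]
        split_ifs at h with hmod hin
        · rw [PySem.Int.floordiv_eq_ediv_of_pos (by omega : (0:Int) < e)] at h
          rcases List.mem_cons.mp h with rfl | h
          · omega
          · rcases List.mem_singleton.mp h with rfl
            exact hxe
        · rcases List.mem_cons.mp h with rfl | h
          · omega
          · simp at h
        · simp at h
      · exact ih (e + 1) (by omega) h
    · rw [if_neg hg] at h; simp at h

def divsAll (xs : List Int) : List Int :=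
  xs.foldl (fun acc x => if 0 < x then acc ++ divsOfC x else acc) []

theorem count_divsAll_go (xs : List Int) (d : Int) (hd : 1 ≤ d) (acc : List Int) :
    (xs.foldl (fun acc x => if 0 < x then acc ++ divsOfC x else acc) acc).count d =
      acc.count d + (if d ≤ 10004 then cntDvd xs d else 0) := by
  induction xs generalizing acc with
  | nil =>
    simp only [List.foldl_nil, cntDvd, List.countP_nil]
    split <;> omega
  | cons y t ih =>
    simp only [List.foldl_cons]
    by_cases hy : 0 < y
    · rw [if_pos hy, ih, List.count_append, count_divsOfC y d hy hd, cntDvd_cons]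
      split_ifs <;> omega
    · rw [if_neg hy, ih, cntDvd_cons,
        if_neg (show ¬(0 < y ∧ d ∣ y) from fun h => hy h.1)]
      split_ifs <;> omega

theorem count_divsAll (xs : List Int) (d : Int) (hd : 1 ≤ d) :
    (divsAll xs).count d = if d ≤ 10004 then cntDvd xs d else 0 := by
  unfold divsAll
  rw [count_divsAll_go xs d hd, List.count_nil]
  omega

theorem mem_divsAll_go (xs : List Int) (k : Int) :
    ∀ acc, k ∈ xs.foldl (fun acc x => if 0 < x then acc ++ divsOfC x else acc) acc →
      1 ≤ k ∨ k ∈ acc := by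
  induction xs with
  | nil => intro acc h; exact Or.inr h
  | cons y t ih =>
    intro acc h
    simp only [List.foldl_cons] at h
    by_cases hy : 0 < y
    · rw [if_pos hy] at h
      rcases ih _ h with h1 | h1
      · exact Or.inl h1
      · rcases List.mem_append.mp h1 with h2 | h2
        · exact Or.inr h2
        · exact Or.inl (mem_divAuxC y k (by omega) y.toNat 1 le_rfl h2)
    · rw [if_neg hy] at h; exact ih _ h

theorem mem_divsAll (xs : List Int) (k : Int) (hk : k ∈ divsAll xs) : 1 ≤ k := by
  rcases mem_divsAll_go xs k [] hk with h | h
  · exact h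
  · simp at h

-- ---- final max fold over the counter's items ----

theorem foldBest_init_le (l : List (Int × Int)) (b : Int) :
    b ≤ l.foldl (fun best p => if 2 ≤ p.2 ∧ best < p.1 then p.1 else best) b := by
  induction l generalizing b with
  | nil => simp
  | cons p t ih =>
    simp only [List.foldl_cons]
    split
    · rename_i h; exact le_trans (le_of_lt h.2) (ih p.1)
    · exact ih b

theorem foldBest_ge (l : List (Int × Int)) (b : Int) (p : Int × Int) (hp : p ∈ l) (h2 : 2 ≤ p.2) :
    p.1 ≤ l.foldl (fun best p => if 2 ≤ p.2 ∧ best < p.1 then p.1 else best) b := by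
  induction l generalizing b with
  | nil => simp at hp
  | cons q t ih =>
    simp only [List.foldl_cons]
    rcases List.mem_cons.mp hp with h | h
    · subst h
      split
      · exact foldBest_init_le t p.1
      · rename_i hcond
        have : p.1 ≤ b := by
          rcases not_and_or.mp hcond with h' | h'
          · exact absurd h2 h'
          · omega
        exact le_trans this (foldBest_init_le t b)
    · exact ih _ h

theorem foldBest_cases (l : List (Int × Int)) (b : Int) :
    l.foldl (fun best p => if 2 ≤ p.2 ∧ best < p.1 then p.1 else best) b = b ∨
      ∃ p ∈ l, 2 ≤ p.2 ∧ l.foldl (fun best p => if 2 ≤ p.2 ∧ best < p.1 then p.1 else best) b = p.1 := by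
  induction l generalizing b with
  | nil => left; rfl
  | cons q t ih =>
    simp only [List.foldl_cons]
    split
    · rename_i h
      rcases ih q.1 with h' | ⟨p, hp, h2, h3⟩
      · right; exact ⟨q, List.mem_cons_self, h.1, h'⟩
      · right; exact ⟨p, List.mem_cons_of_mem _ hp, h2, h3⟩
    · rcases ih b with h' | ⟨p, hp, h2, h3⟩
      · left; exact h'
      · right; exact ⟨p, List.mem_cons_of_mem _ hp, h2, h3⟩

theorem B_eq_goA (xs : List Int) : maxSharedCategories_alt xs = goA xs 10004 := by
  have hB : maxSharedCategories_alt xs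
      = (PySem.Dict.counter (divsAll xs)).items.foldl
          (fun best p => if 2 ≤ p.2 ∧ best < p.1 then p.1 else best) 1 := by
    show ((divsAll xs).foldl (fun d k => d.insert k (d.getD k 0 + 1))
        (PySem.Dict.empty : PySem.Dict Int Int)).items.foldl
        (fun best p => if 2 ≤ p.2 ∧ best < p.1 then p.1 else best) 1 = _
    have hc := PySem.Dict.foldl_insert_getD_add_one_eq_counter (divsAll xs)
    exact congrArg (fun t : PySem.Dict Int Int =>
      t.items.foldl (fun best p => if 2 ≤ p.2 ∧ best < p.1 then p.1 else best) 1) hc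
  rw [hB, PySem.Dict.items_counter]
  apply le_antisymm
  · rcases foldBest_cases ((PySem.Set.ofList (divsAll xs)).map
        (fun k => (k, ((divsAll xs).count k : Int)))) 1 with h | ⟨p, hp, h2, h3⟩
    · rw [h]; exact goA_one_le xs 10004
    · rw [h3]
      obtain ⟨k, hk, rfl⟩ := List.mem_map.mp hp
      have hkmem : k ∈ divsAll xs := (PySem.Set.mem_ofList _ _).mp hk
      have hk1 : 1 ≤ k := mem_divsAll xs k hkmem
      have h2' : (2:Int) ≤ ((divsAll xs).count k : Int) := h2
      have hcnt2 : 2 ≤ (divsAll xs).count k := by exact_mod_cast h2'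
      have hk4 : k ≤ 10004 := by
        by_contra h4
        rw [count_divsAll xs k hk1, if_neg (by omega)] at hcnt2
        omega
      rw [count_divsAll xs k hk1, if_pos hk4] at hcnt2
      have := goA_ge xs 10004 k.toNat (by omega) (by omega)
        (by rwa [Int.toNat_of_nonneg (by omega)])
      rwa [Int.toNat_of_nonneg (by omega)] at this
  · rcases goA_cases xs 10004 with h | ⟨i, h1, h2, h3, h4⟩
    · rw [h]; exact foldBest_init_le _ 1
    · rw [h4]
      have hd1 : (1:Int) ≤ (i : Int) := by exact_mod_cast h1
      have hcnt : (divsAll xs).count (i : Int) = cntDvd xs (i : Int) := by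
        rw [count_divsAll xs _ hd1, if_pos (by exact_mod_cast h2)]
      have hmem : (i : Int) ∈ divsAll xs := by
        apply List.count_pos_iff.mp
        omega
      have hpL : ((i : Int), ((divsAll xs).count (i : Int) : Int)) ∈
          (PySem.Set.ofList (divsAll xs)).map (fun k => (k, ((divsAll xs).count k : Int))) :=
        List.mem_map.mpr ⟨(i : Int), (PySem.Set.mem_ofList _ _).mpr hmem, rfl⟩
      apply foldBest_ge _ 1 _ hpL
      show (2:Int) ≤ ((divsAll xs).count (i : Int) : Int)
      rw [hcnt]
      exact_mod_cast h3

-- ===== VERDICT (by name: the statement is the Claim_ definition above) =====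
theorem maxSharedCategories_spec : Claim_equal_maxSharedCategories := by
  intro xs _
  unfold Spec_maxSharedCategories
  rw [A_eq_goA, B_eq_goA]
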